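-- pv_equiv track=rewrite | github.com/saiyesaswym/Algorithms-DataStructures-using-Python | Amazon/UtilizationCheck.py | utilizationCheck
-- ===== SOURCE A (Python) =====
-- import math
--
-- def utilizationCheck(instances, avgutil):
--     flag=0
--     for i in avgutil:
--         if i<25 and flag==0:
--             instances = math.ceil(instances/2)
--             flag=10
--         elif i>60 and flag==0 and instances<=108:
--             instances = instances*2
--             flag=10
--         else:
--             if flag>0:
--                 flag-=1
--     return instances
-- ===== SOURCE B (Python) =====
-- import math
--
-- def utilizationCheck(instances, avgutil):
--     a = list(avgutil)
--     n = len(a)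
--     start = 0
--     while True:
--         i = next((k for k in range(start, n)
--                   if a[k] < 25 or (a[k] > 60 and instances <= 108)), None)
--         if i is None:
--             return instances
--         if a[i] < 25:
--             instances = math.ceil(instances / 2)
--         else:
--             instances = instances * 2
--         start = i + 11
-- ===== Notes on version B (the rewrite author's own statement) =====
-- stated objective: alternative
-- what changed: B is restructured as repeated event search: a next(...) generator scans from the current offset for the index of the next triggering reading, the one scaling action is applied there, and the search restarts past the 10-reading cooldown, instead of folding a decrementing cooldown flag through every reading.
import Mathlib
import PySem

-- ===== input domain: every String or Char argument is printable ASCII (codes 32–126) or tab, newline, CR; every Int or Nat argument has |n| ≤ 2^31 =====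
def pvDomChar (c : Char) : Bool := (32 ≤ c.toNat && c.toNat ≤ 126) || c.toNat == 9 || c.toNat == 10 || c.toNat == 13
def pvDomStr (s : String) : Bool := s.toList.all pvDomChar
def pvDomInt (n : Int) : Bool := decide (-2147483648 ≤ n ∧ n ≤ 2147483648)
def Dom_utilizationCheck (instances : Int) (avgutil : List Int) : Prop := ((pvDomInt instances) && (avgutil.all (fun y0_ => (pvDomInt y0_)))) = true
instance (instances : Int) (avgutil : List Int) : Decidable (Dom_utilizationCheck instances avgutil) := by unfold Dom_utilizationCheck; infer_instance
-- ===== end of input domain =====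

-- B replaces A's per-reading fold with a decrementing cooldown flag by repeated event search:
-- find the index of the next triggering reading, apply the one scaling action, restart the
-- search past the cooldown; return values proved equal.

-- math.ceil(n/2) on an int (exact for integer n: ceil(n/2) = -((-n)//2))
def pvCeilHalf (n : Int) : Int := -(PySem.Int.floordiv (-n) 2)

-- ===== PORT A =====
-- A's loop body: state is (instances, flag)
def pvStepA (s : Int × Int) (i : Int) : Int × Int :=
  if i < 25 ∧ s.2 = 0 then (pvCeilHalf s.1, 10)
  else if i > 60 ∧ s.2 = 0 ∧ s.1 ≤ 108 then (s.1 * 2, 10)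
  else (s.1, if s.2 > 0 then s.2 - 1 else s.2)

def utilizationCheck (instances : Int) (avgutil : List Int) : Int :=
  (avgutil.foldl pvStepA (instances, 0)).1

-- ===== PORT B =====
-- Source B's generator condition: reading r triggers a scaling action at instance count inst
def pvTrig (inst : Int) (r : Int) : Bool := r < 25 || (r > 60 && inst ≤ 108)

-- Source B's 'next((k for k in range(start, n) if <trigger a[k]>), None)': first triggering
-- index ≥ start (scanning the suffix and re-adding the offset)
def pvFindFrom (inst : Int) (a : List Int) (start : Nat) : Option Nat :=
  match (a.drop start).findIdx? (pvTrig inst) with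
  | none => none
  | some j => some (start + j)

-- needed by pvRunB's termination proof (cited by name in decreasing_by)
theorem pvFindFrom_bounds (inst : Int) (a : List Int) (start i : Nat)
    (h : pvFindFrom inst a start = some i) : start ≤ i ∧ i < a.length := by
  unfold pvFindFrom at h
  cases hj : (a.drop start).findIdx? (pvTrig inst) with
  | none => rw [hj] at h; simp at h
  | some j =>
    rw [hj] at h
    injection h with h
    have hlt := (List.findIdx?_eq_some_iff_getElem.mp hj).choose
    rw [List.length_drop] at hlt
    omega

-- Source B's while loop: i = next triggering index from 'start' (none → return instances),
-- act on a[i], continue from start = i + 11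
def pvRunB (inst : Int) (a : List Int) (start : Nat) : Int :=
  match h : pvFindFrom inst a start with
  | none => inst
  | some i =>
      pvRunB (if a.getD i 0 < 25 then pvCeilHalf inst else inst * 2) a (i + 11)
termination_by a.length + 1 - start
decreasing_by
  have := pvFindFrom_bounds inst a start i h
  omega

def utilizationCheck_alt (instances : Int) (avgutil : List Int) : Int :=
  pvRunB instances avgutil 0

-- ===== PRECONDITION & SPEC =====
def Spec_utilizationCheck (instances : Int) (avgutil : List Int) (out : Int) : Prop := out = utilizationCheck_alt instances avgutil
instance (instances : Int) (avgutil : List Int) (out : Int) : Decidable (Spec_utilizationCheck instances avgutil out) := by unfold Spec_utilizationCheck; infer_instance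

-- ===== CLAIM (what is proved, stated in full; the proofs are below) =====
def Claim_equal_utilizationCheck : Prop := ∀ (instances : Int) (avgutil : List Int), Dom_utilizationCheck instances avgutil → Spec_utilizationCheck instances avgutil (utilizationCheck instances avgutil)

-- ===== LEMMAS AND PROOFS =====

-- Unfold equations for the two well-founded recursions.
theorem pvRunB_none (inst : Int) (a : List Int) (start : Nat)
    (h : pvFindFrom inst a start = none) : pvRunB inst a start = inst := by
  conv_lhs => rw [pvRunB]
  split
  · rfl
  · rename_i i hi
    rw [h] at hi
    cases hi

theorem pvRunB_some (inst : Int) (a : List Int) (start i : Nat)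
    (h : pvFindFrom inst a start = some i) :
    pvRunB inst a start =
      pvRunB (if a.getD i 0 < 25 then pvCeilHalf inst else inst * 2) a (i + 11) := by
  conv_lhs => rw [pvRunB]
  split
  · rename_i hi
    rw [h] at hi
    cases hi
  · rename_i i' hi'
    rw [h] at hi'
    injection hi' with hi'
    subst hi'
    rfl

-- Proof-layer intermediary: B's event loop phrased on the remaining suffix instead of an offset.
theorem pvFindIdx?_lt_length {α : Type} (p : α → Bool) (l : List α) (i : Nat)
    (h : l.findIdx? p = some i) : i < l.length :=
  (List.findIdx?_eq_some_iff_getElem.mp h).choose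

def pvRunL (inst : Int) (a : List Int) : Int :=
  match h : a.findIdx? (pvTrig inst) with
  | none => inst
  | some i =>
      pvRunL (if a.getD i 0 < 25 then pvCeilHalf inst else inst * 2) (a.drop (i + 11))
termination_by a.length
decreasing_by
  have := pvFindIdx?_lt_length (pvTrig inst) a i h
  simp; omega

theorem pvRunL_none (inst : Int) (a : List Int)
    (h : a.findIdx? (pvTrig inst) = none) : pvRunL inst a = inst := by
  conv_lhs => rw [pvRunL]
  split
  · rfl
  · rename_i i hi
    rw [h] at hi
    cases hi

theorem pvRunL_some (inst : Int) (a : List Int) (i : Nat)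
    (h : a.findIdx? (pvTrig inst) = some i) :
    pvRunL inst a =
      pvRunL (if a.getD i 0 < 25 then pvCeilHalf inst else inst * 2) (a.drop (i + 11)) := by
  conv_lhs => rw [pvRunL]
  split
  · rename_i hi
    rw [h] at hi
    cases hi
  · rename_i i' hi'
    rw [h] at hi'
    injection hi' with hi'
    subst hi'
    rfl

-- The offset-threading port computes the suffix-recursion value.
theorem runB_eq_runL : ∀ (k : Nat) (inst : Int) (a : List Int) (start : Nat),
    a.length + 1 - start ≤ k → pvRunB inst a start = pvRunL inst (a.drop start) := by
  intro k
  induction k with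
  | zero =>
    intro inst a start hk
    have hd : a.drop start = [] := by
      rw [List.drop_eq_nil_iff]; omega
    have hf : pvFindFrom inst a start = none := by
      unfold pvFindFrom; rw [hd, List.findIdx?_nil]
    rw [pvRunB_none inst a start hf, hd, pvRunL_none inst [] List.findIdx?_nil]
  | succ m ih =>
    intro inst a start hk
    cases hj : (a.drop start).findIdx? (pvTrig inst) with
    | none =>
      have hf : pvFindFrom inst a start = none := by
        unfold pvFindFrom; rw [hj]
      rw [pvRunB_none inst a start hf, pvRunL_none inst _ hj]
    | some j =>
      have hf : pvFindFrom inst a start = some (start + j) := by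
        unfold pvFindFrom; rw [hj]
      have hb := pvFindFrom_bounds inst a start (start + j) hf
      have hg : (a.drop start).getD j 0 = a.getD (start + j) 0 := by
        simp [List.getD, List.getElem?_drop]
      have hd : (a.drop start).drop (j + 11) = a.drop (start + j + 11) := by
        rw [List.drop_drop]; congr 1
      rw [pvRunB_some inst a start (start + j) hf, pvRunL_some inst _ j hj, hg, hd]
      exact ih _ a (start + j + 11) (by omega)

-- Unfolding pvRunL on a non-triggering head: the search just moves on.
theorem runL_skip (inst x : Int) (rest : List Int) (hx : pvTrig inst x = false) :
    pvRunL inst (x :: rest) = pvRunL inst rest := by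
  cases hr : rest.findIdx? (pvTrig inst) with
  | none =>
    have hc : (x :: rest).findIdx? (pvTrig inst) = none := by
      simp [List.findIdx?_cons, hx, hr]
    rw [pvRunL_none inst _ hc, pvRunL_none inst rest hr]
  | some j =>
    have hc : (x :: rest).findIdx? (pvTrig inst) = some (j + 1) := by
      simp [List.findIdx?_cons, hx, hr]
    rw [pvRunL_some inst _ (j + 1) hc, pvRunL_some inst rest j hr]
    have hg : (x :: rest).getD (j + 1) 0 = rest.getD j 0 := by
      simp [List.getD]
    have hd : (x :: rest).drop (j + 1 + 11) = rest.drop (j + 11) := by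
      rw [show j + 1 + 11 = (j + 11) + 1 from by omega, List.drop_succ_cons]
    rw [hg, hd]

-- Unfolding pvRunL on a triggering head: act, then continue past the 10-reading cooldown.
theorem runL_trig (inst x : Int) (rest : List Int) (hx : pvTrig inst x = true) :
    pvRunL inst (x :: rest) =
      pvRunL (if x < 25 then pvCeilHalf inst else inst * 2) (rest.drop 10) := by
  have hc : (x :: rest).findIdx? (pvTrig inst) = some 0 := by
    simp [List.findIdx?_cons, hx]
  rw [pvRunL_some inst _ 0 hc]
  simp [List.getD]

-- Invariant: running A's fold with cooldown flag f is running B's event loop on the list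
-- with the first f readings dropped.
theorem foldA_eq_runL (l : List Int) (inst f : Int) (hf : 0 ≤ f) :
    (l.foldl pvStepA (inst, f)).1 = pvRunL inst (l.drop f.toNat) := by
  induction l generalizing inst f with
  | nil => simp [pvRunL_none inst [] List.findIdx?_nil]
  | cons x rest ih =>
    rcases eq_or_lt_of_le hf with hf0 | hfpos
    · -- flag is 0: both programs inspect x
      have : f = 0 := hf0.symm
      subst this
      simp only [Int.toNat_zero, List.drop_zero, List.foldl_cons]
      by_cases h1 : x < 25
      · have ht : pvTrig inst x = true := by simp [pvTrig]; omega
        have hstep : pvStepA (inst, 0) x = (pvCeilHalf inst, 10) := by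
          simp [pvStepA, h1]
        rw [runL_trig inst x rest ht, if_pos h1, hstep]
        simpa using ih (pvCeilHalf inst) 10 (by omega)
      · by_cases h2 : x > 60 ∧ inst ≤ 108
        · have ht : pvTrig inst x = true := by simp [pvTrig]; omega
          have hstep : pvStepA (inst, 0) x = (inst * 2, 10) := by
            simp [pvStepA, h1, h2.1, h2.2]
          rw [runL_trig inst x rest ht, if_neg h1, hstep]
          simpa using ih (inst * 2) 10 (by omega)
        · have ht : pvTrig inst x = false := by
            simp only [pvTrig, Bool.or_eq_false_iff, Bool.and_eq_false_iff,
              decide_eq_false_iff_not, not_lt, not_le]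
            omega
          have hstep : pvStepA (inst, 0) x = (inst, 0) := by
            simp only [pvStepA]
            rw [if_neg (by tauto), if_neg (by tauto)]
            simp
          rw [runL_skip inst x rest ht, hstep]
          simpa using ih inst 0 (by omega)
    · -- flag positive: A decrements it, B's search starts past this reading
      have hne : ¬ (f = 0) := by omega
      have hdrop : (x :: rest).drop f.toNat = rest.drop (f - 1).toNat := by
        have h1 : f.toNat = (f - 1).toNat + 1 := by omega
        rw [h1]; rfl
      rw [hdrop, List.foldl_cons]
      have hstep : pvStepA (inst, f) x = (inst, f - 1) := by
        simp [pvStepA, hne, hfpos]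
      rw [hstep]
      exact ih inst (f - 1) (by omega)

-- ===== VERDICT (by name: the statement is the Claim_ definition above) =====
theorem utilizationCheck_spec : Claim_equal_utilizationCheck := by
  intro instances avgutil _
  unfold Spec_utilizationCheck utilizationCheck utilizationCheck_alt
  rw [runB_eq_runL (avgutil.length + 1) instances avgutil 0 (by omega)]
  simpa using foldA_eq_runL avgutil instances 0 le_rfl
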